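-- pv_equiv track=rewrite | github.com/yuyaxiong/interveiw_algorithm | LeetCode/567.py | cmp_dict
-- ===== SOURCE A (Python) =====
-- def cmp_dict(t1_dict, t2_dict):
--     for k, v in t1_dict.items():
--         if v == 0:
--             continue
--         if t2_dict.get(k) != v:
--             return False
--     for k, v in t2_dict.items():
--         if v == 0:
--             continue
--         if t1_dict.get(k) != v:
--             return False
--     return True
-- ===== SOURCE B (Python) =====
-- def cmp_dict(t1_dict, t2_dict):
--     def norm(d):
--         return sorted(((k, v) for k, v in d.items() if v != 0), key=lambda p: p[0])
--     return norm(t1_dict) == norm(t2_dict)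
-- ===== Notes on version B (the rewrite author's own statement) =====
-- stated objective: alternative
-- what changed: B canonicalizes each dict by sorting its nonzero (key, value) items by key and compares the two sorted lists, replacing A's two-way scan-and-probe with .get by a sort-then-compare normalization; Pre_ excludes association lists with duplicate keys, which do not represent any Python dict input and on which the first-vs-last-match reading of the list is ambiguous.
import Mathlib
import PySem

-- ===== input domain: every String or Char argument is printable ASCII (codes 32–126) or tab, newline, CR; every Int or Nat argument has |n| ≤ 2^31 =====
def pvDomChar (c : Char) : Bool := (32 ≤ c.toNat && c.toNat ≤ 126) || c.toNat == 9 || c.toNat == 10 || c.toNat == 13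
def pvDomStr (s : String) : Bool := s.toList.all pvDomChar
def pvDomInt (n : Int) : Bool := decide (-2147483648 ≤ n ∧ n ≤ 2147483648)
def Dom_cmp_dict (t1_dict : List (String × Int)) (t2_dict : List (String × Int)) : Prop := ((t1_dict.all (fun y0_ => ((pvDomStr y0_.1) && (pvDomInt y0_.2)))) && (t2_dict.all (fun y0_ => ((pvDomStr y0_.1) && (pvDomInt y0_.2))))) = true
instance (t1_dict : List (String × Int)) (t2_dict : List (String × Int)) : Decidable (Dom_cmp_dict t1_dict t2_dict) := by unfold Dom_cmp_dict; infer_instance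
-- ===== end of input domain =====

-- B canonicalizes each dict by sorting its nonzero items by key and compares the two
-- sorted lists, instead of A's two scan-and-probe loops (objective: alternative).

-- ===== PORT A =====
-- one of A's two identical loops: scan `l`, skip zero values, probe `other` with .get
def cmpLoop (other : PySem.Dict String Int) : List (String × Int) → Bool
  | [] => true
  | (k, v) :: rest =>
      if v = 0 then cmpLoop other rest
      else if other.get? k ≠ some v then false
      else cmpLoop other rest

def cmp_dict (t1_dict : List (String × Int)) (t2_dict : List (String × Int)) : Bool :=
  cmpLoop (PySem.Dict.mk t2_dict) t1_dict && cmpLoop (PySem.Dict.mk t1_dict) t2_dict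

-- ===== PORT B =====
-- norm(d): the nonzero (k, v) items of d, sorted by key (sorted(..., key=lambda p: p[0]))
def normPairs (l : List (String × Int)) : List (String × Int) :=
  PySem.List.sorted (l.filter (fun p => p.2 ≠ 0)) (fun p => p.1) false

def cmp_dict_alt (t1_dict : List (String × Int)) (t2_dict : List (String × Int)) : Bool :=
  normPairs t1_dict == normPairs t2_dict

-- ===== PRECONDITION & SPEC =====
-- Pre_ excludes association lists with duplicate keys: they do not represent any Python
-- dict input (a dict's keys are unique), and on them the first-vs-last-match reading of
-- the list is ambiguous.
def Pre_cmp_dict (t1_dict : List (String × Int)) (t2_dict : List (String × Int)) : Prop :=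
  (t1_dict.map Prod.fst).Nodup ∧ (t2_dict.map Prod.fst).Nodup
instance (t1_dict : List (String × Int)) (t2_dict : List (String × Int)) : Decidable (Pre_cmp_dict t1_dict t2_dict) := by unfold Pre_cmp_dict; infer_instance

def pvWitness_cmp_dict : (List (String × Int)) × (List (String × Int)) :=
  ([("a", 1), ("b", 0)], [("a", 1)])

def Spec_cmp_dict (t1_dict : List (String × Int)) (t2_dict : List (String × Int)) (out : Bool) : Prop := out = cmp_dict_alt t1_dict t2_dict
instance (t1_dict : List (String × Int)) (t2_dict : List (String × Int)) (out : Bool) : Decidable (Spec_cmp_dict t1_dict t2_dict out) := by unfold Spec_cmp_dict; infer_instance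

-- ===== CLAIM (what is proved, stated in full; the proofs are below) =====
def Claim_equal_cmp_dict : Prop := ∀ (t1_dict : List (String × Int)) (t2_dict : List (String × Int)), Dom_cmp_dict t1_dict t2_dict → Pre_cmp_dict t1_dict t2_dict → Spec_cmp_dict t1_dict t2_dict (cmp_dict t1_dict t2_dict)

-- ===== LEMMAS AND PROOFS =====

theorem cmpLoop_eq_all (d : PySem.Dict String Int) (l : List (String × Int)) :
    cmpLoop d l = l.all (fun p => p.2 == 0 || d.get? p.1 == some p.2) := by
  induction l with
  | nil => rfl
  | cons p rest ih =>
    obtain ⟨k, v⟩ := p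
    simp only [cmpLoop, List.all_cons, ih]
    by_cases hv : v = 0
    · simp [hv]
    · by_cases hg : d.get? k = some v <;> simp [hv, hg]

-- membership characterization of get? on a literal dict with Nodup keys
theorem get?_mk_iff (l : List (String × Int)) (h : (l.map Prod.fst).Nodup)
    (k : String) (v : Int) :
    (PySem.Dict.mk l).get? k = some v ↔ (k, v) ∈ l := by
  have hk : (PySem.Dict.mk l).keys.Nodup := by simpa [PySem.Dict.keys] using h
  simpa using PySem.Dict.get?_eq_some_iff_mem_items (PySem.Dict.mk l) k v hk

-- one loop of A succeeds iff the nonzero items of its list all appear in the other list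
theorem cmpLoop_true_iff (t other : List (String × Int))
    (hother : (other.map Prod.fst).Nodup) :
    cmpLoop (PySem.Dict.mk other) t = true ↔
      ∀ p ∈ t.filter (fun q => q.2 ≠ 0), p ∈ other.filter (fun q => q.2 ≠ 0) := by
  rw [cmpLoop_eq_all]
  simp only [List.all_eq_true, Bool.or_eq_true, beq_iff_eq, List.mem_filter,
    decide_eq_true_eq]
  constructor
  · rintro h p ⟨hp, hv⟩
    rcases h p hp with h0 | hg
    · exact absurd h0 hv
    · exact ⟨(get?_mk_iff other hother p.1 p.2).mp hg, hv⟩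
  · intro h p hp
    by_cases hv : p.2 = 0
    · exact Or.inl hv
    · exact Or.inr ((get?_mk_iff other hother p.1 p.2).mpr (h p ⟨hp, hv⟩).1)

-- sorting by key is a canonical form: two key-Nodup lists sort equal iff they are permutations
theorem normPairs_eq_iff (l1 l2 : List (String × Int))
    (h1 : ((l1.filter (fun q => q.2 ≠ 0)).map Prod.fst).Nodup) :
    normPairs l1 = normPairs l2 ↔
      (l1.filter (fun q => q.2 ≠ 0)).Perm (l2.filter (fun q => q.2 ≠ 0)) := by
  set f1 := l1.filter (fun q => q.2 ≠ 0)
  set f2 := l2.filter (fun q => q.2 ≠ 0)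
  constructor
  · intro h
    have ha : (normPairs l1).Perm f1 := PySem.List.sorted_perm f1 _ _
    have hb : (normPairs l2).Perm f2 := PySem.List.sorted_perm f2 _ _
    exact ha.symm.trans (h ▸ hb)
  · intro hperm
    -- normPairs l1 is a strictly key-increasing rearrangement of f2, hence equals sorted f2
    have hp1 : (normPairs l1).Perm f1 := PySem.List.sorted_perm f1 _ _
    have hle : (normPairs l1).Pairwise (fun a b => a.1 ≤ b.1) :=
      PySem.List.sorted_pairwise f1 _
    have hndmap : ((normPairs l1).map Prod.fst).Nodup :=
      (hp1.map Prod.fst).nodup_iff.mpr h1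
    have hne : (normPairs l1).Pairwise (fun a b => a.1 ≠ b.1) :=
      (List.pairwise_map.mp hndmap)
    have hlt : (normPairs l1).Pairwise (fun a b => a.1 < b.1) :=
      (hle.and hne).imp (fun h => lt_of_le_of_ne h.1 h.2)
    exact (PySem.List.sorted_eq_of_perm_of_pairwise_lt _ _ _ (hp1.trans hperm) hlt).symm

theorem main_thm (t1 t2 : List (String × Int))
    (h1 : (t1.map Prod.fst).Nodup) (h2 : (t2.map Prod.fst).Nodup) :
    cmp_dict t1 t2 = cmp_dict_alt t1 t2 := by
  have hf1 : ((t1.filter (fun q => q.2 ≠ 0)).map Prod.fst).Nodup :=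
    h1.sublist (List.Sublist.map _ List.filter_sublist)
  have hf2 : ((t2.filter (fun q => q.2 ≠ 0)).map Prod.fst).Nodup :=
    h2.sublist (List.Sublist.map _ List.filter_sublist)
  have hn1 : (t1.filter (fun q => q.2 ≠ 0)).Nodup := hf1.of_map
  have hn2 : (t2.filter (fun q => q.2 ≠ 0)).Nodup := hf2.of_map
  rw [Bool.eq_iff_iff]
  unfold cmp_dict cmp_dict_alt
  rw [Bool.and_eq_true, beq_iff_eq, normPairs_eq_iff t1 t2 hf1,
    cmpLoop_true_iff t1 t2 h2, cmpLoop_true_iff t2 t1 h1,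
    List.perm_ext_iff_of_nodup hn1 hn2]
  constructor
  · rintro ⟨hab, hba⟩ p
    exact ⟨fun hp => hab p hp, fun hp => hba p hp⟩
  · intro h
    exact ⟨fun p hp => (h p).mp hp, fun p hp => (h p).mpr hp⟩

-- ===== VERDICT (by name: the statement is the Claim_ definition above) =====
theorem cmp_dict_spec : Claim_equal_cmp_dict := by
  intro t1 t2 _ hpre
  unfold Spec_cmp_dict
  exact main_thm t1 t2 hpre.1 hpre.2
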